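-- pv_equiv track=rewrite | github.com/EuiseokJeongNZ/preparation_korean_coding_interview | 프로그래머스/2/388353. 지게차와 크레인/지게차와 크레인.py | forklift
-- ===== SOURCE A (Python) =====
-- from collections import deque
--
-- empty = '0'
--
-- def bfs(grid, si, sj):
--     n, m = len(grid), len(grid[0])
--     dirs = ((1, 0), (-1, 0), (0, 1), (0, -1))
--     q = deque()
--     visited = [[False] * m for _ in range(n)]
--
--     for di, dj in dirs:
--         ni, nj = si + di, sj + dj
--         if ni < 0 or ni >= n or nj < 0 or nj >= m:
--             return True
--         if grid[ni][nj] == empty: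
--             q.append((ni, nj))
--
--     while q:
--         r, c = q.popleft()
--         if visited[r][c]:
--             continue
--         visited[r][c] = True
--
--         for di, dj in dirs:
--             nr, nc = r + di, c + dj
--             if nr < 0 or nr >= n or nc < 0 or nc >= m:
--                 return True
--             if not visited[nr][nc] and grid[nr][nc] == empty:
--                 q.append((nr, nc))
--
--     return False
--
-- def forklift(grid, target):
--     r, c = len(grid), len(grid[0])
--     to_remove = []
--
--     for i in range(r):
--         for j in range(c):
--             if grid[i][j] != target:
--                 continue
--             if bfs(grid, i, j):
--                 to_remove.append((i, j))
--
--     for i, j in to_remove: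
--         grid[i][j] = empty
--
--     return len(to_remove)
-- ===== SOURCE B (Python) =====
-- empty = '0'
--
-- def forklift(grid, target):
--     r, c = len(grid), len(grid[0])
--     # One flood fill: mark every empty cell connected to the grid border.
--     reach = [[False] * c for _ in range(r)]
--     stack = []
--     for i in range(r):
--         for j in range(c):
--             if (i == 0 or i == r - 1 or j == 0 or j == c - 1) \
--                     and grid[i][j] == empty and not reach[i][j]:
--                 reach[i][j] = True
--                 stack.append((i, j))
--     while stack:
--         i, j = stack.pop()
--         for ni, nj in ((i + 1, j), (i - 1, j), (i, j + 1), (i, j - 1)):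
--             if 0 <= ni < r and 0 <= nj < c and not reach[ni][nj] \
--                     and grid[ni][nj] == empty:
--                 reach[ni][nj] = True
--                 stack.append((ni, nj))
--     removed = []
--     for i in range(r):
--         for j in range(c):
--             if grid[i][j] != target:
--                 continue
--             if i == 0 or i == r - 1 or j == 0 or j == c - 1 \
--                     or reach[i + 1][j] or reach[i - 1][j] \
--                     or reach[i][j + 1] or reach[i][j - 1]:
--                 removed.append((i, j))
--     for i, j in removed:
--         grid[i][j] = empty
--     return len(removed)
-- ===== Notes on version B (the rewrite author's own statement) =====
-- stated objective: alternative
-- what changed: A runs a fresh whole-grid BFS from every target cell to see whether it can escape to the border; B instead flood-fills the border-connected empty region once (stack DFS seeded from all border empty cells) and then classifies each target cell by a constant-time check (on the border, or adjacent to a marked empty cell).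
import Mathlib
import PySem

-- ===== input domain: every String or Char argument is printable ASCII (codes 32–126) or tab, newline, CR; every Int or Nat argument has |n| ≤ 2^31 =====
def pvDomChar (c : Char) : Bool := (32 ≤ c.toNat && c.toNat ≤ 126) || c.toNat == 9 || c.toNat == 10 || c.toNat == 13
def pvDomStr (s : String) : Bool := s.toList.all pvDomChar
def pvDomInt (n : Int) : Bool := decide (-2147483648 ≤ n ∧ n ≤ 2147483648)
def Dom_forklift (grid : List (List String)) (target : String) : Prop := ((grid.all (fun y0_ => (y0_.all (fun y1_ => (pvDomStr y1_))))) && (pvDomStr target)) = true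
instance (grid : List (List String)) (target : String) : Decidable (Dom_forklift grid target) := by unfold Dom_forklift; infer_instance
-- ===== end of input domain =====

-- B replaces A's per-box BFS with one border flood fill plus a linear scan (a different algorithm).
-- Both Pythons mutate `grid` identically (removed boxes set to '0'); the theorems are about the return value.

-- ===== PORT A =====
-- cell accessor: used only under 0 ≤ i < len(grid), 0 ≤ j < len(grid[0]) with rows ≥ len(grid[0]) (Pre_), where it is exact
def pvCell (grid : List (List String)) (i j : Int) : String :=
  (grid.getD i.toNat []).getD j.toNat ""

def pvDirs : List (Int × Int) := [(1, 0), (-1, 0), (0, 1), (0, -1)]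

-- the initial for-loop of bfs: none = `return True` (a neighbour fell off the grid), some q = the seeded deque
def pvSeedA (grid : List (List String)) (n m si sj : Int) :
    List (Int × Int) → List (Int × Int) → Option (List (Int × Int))
  | [], q => some q
  | (di, dj) :: ds, q =>
    let ni := si + di
    let nj := sj + dj
    if ni < 0 ∨ n ≤ ni ∨ nj < 0 ∨ m ≤ nj then none
    else pvSeedA grid n m si sj ds (if pvCell grid ni nj = "0" then q ++ [(ni, nj)] else q)

-- the inner for-loop of the while: none = `return True`, some q' = deque after the appends
def pvExpandA (grid : List (List String)) (n m r c : Int) (visited : Finset (Int × Int)) :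
    List (Int × Int) → List (Int × Int) → Option (List (Int × Int))
  | [], q => some q
  | (di, dj) :: ds, q =>
    let nr := r + di
    let nc := c + dj
    if nr < 0 ∨ n ≤ nr ∨ nc < 0 ∨ m ≤ nc then none
    else pvExpandA grid n m r c visited ds
      (if (nr, nc) ∉ visited ∧ pvCell grid nr nc = "0" then q ++ [(nr, nc)] else q)

-- the while-loop; fuel only makes the recursion structural (proved never to run out for the fuel bfsA passes)
def pvBfsLoopA (grid : List (List String)) (n m : Int) :
    Nat → List (Int × Int) → Finset (Int × Int) → Bool
  | _, [], _ => false
  | 0, _ :: _, _ => false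
  | fuel + 1, (r, c) :: rest, visited =>
    if (r, c) ∈ visited then pvBfsLoopA grid n m fuel rest visited
    else
      match pvExpandA grid n m r c (insert (r, c) visited) pvDirs rest with
      | none => true
      | some q' => pvBfsLoopA grid n m fuel q' (insert (r, c) visited)

def pvBfsA (grid : List (List String)) (si sj : Int) : Bool :=
  let n : Int := grid.length
  let m : Int := (grid.headD []).length
  match pvSeedA grid n m si sj pvDirs [] with
  | none => true
  | some q0 => pvBfsLoopA grid n m (q0.length + 5 * (n.toNat * m.toNat) + 1) q0 ∅

def forklift (grid : List (List String)) (target : String) : Int :=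
  let r : Int := grid.length
  let c : Int := (grid.headD []).length
  let toRemove :=
    (PySem.List.pyRange 0 r 1).foldl (fun acc i =>
      (PySem.List.pyRange 0 c 1).foldl (fun acc2 j =>
        if pvCell grid i j ≠ target then acc2
        else if pvBfsA grid i j then acc2 ++ [(i, j)] else acc2) acc) []
  (toRemove.length : Int)

-- ===== PORT B =====
def pvNbrs (p : Int × Int) : List (Int × Int) :=
  [(p.1 + 1, p.2), (p.1 - 1, p.2), (p.1, p.2 + 1), (p.1, p.2 - 1)]

-- seeding scan: push every border empty cell once (stack kept top-first; reach as the set of marked cells)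
def pvSeedStepB (grid : List (List String)) (n m i : Int)
    (st : List (Int × Int) × Finset (Int × Int)) (j : Int) :
    List (Int × Int) × Finset (Int × Int) :=
  if (i = 0 ∨ i = n - 1 ∨ j = 0 ∨ j = m - 1) ∧ pvCell grid i j = "0" ∧ (i, j) ∉ st.2
  then ((i, j) :: st.1, insert (i, j) st.2) else st

def pvSeedB (grid : List (List String)) (n m : Int) :
    List (Int × Int) × Finset (Int × Int) :=
  (PySem.List.pyRange 0 n 1).foldl (fun st i =>
    (PySem.List.pyRange 0 m 1).foldl (pvSeedStepB grid n m i) st) ([], ∅)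

-- the inner for-loop of the DFS: mark-and-push each in-range unmarked empty neighbour
def pvPushB (grid : List (List String)) (n m : Int) :
    List (Int × Int) → List (Int × Int) × Finset (Int × Int) →
    List (Int × Int) × Finset (Int × Int)
  | [], st => st
  | p :: ps, (stack, reach) =>
    if 0 ≤ p.1 ∧ p.1 < n ∧ 0 ≤ p.2 ∧ p.2 < m ∧ p ∉ reach ∧ pvCell grid p.1 p.2 = "0"
    then pvPushB grid n m ps (p :: stack, insert p reach)
    else pvPushB grid n m ps (stack, reach)

-- the while-loop of the DFS; fuel only makes the recursion structural
def pvDfsB (grid : List (List String)) (n m : Int) :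
    Nat → List (Int × Int) → Finset (Int × Int) → Finset (Int × Int)
  | _, [], reach => reach
  | 0, _ :: _, reach => reach
  | fuel + 1, p :: rest, reach =>
    let st := pvPushB grid n m (pvNbrs p) (rest, reach)
    pvDfsB grid n m fuel st.1 st.2

def pvReachB (grid : List (List String)) (n m : Int) : Finset (Int × Int) :=
  let st := pvSeedB grid n m
  pvDfsB grid n m (st.1.length + 2 * (n.toNat * m.toNat) + 1) st.1 st.2

def forklift_alt (grid : List (List String)) (target : String) : Int :=
  let r : Int := grid.length
  let c : Int := (grid.headD []).length
  let reach := pvReachB grid r c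
  let removed :=
    (PySem.List.pyRange 0 r 1).foldl (fun acc i =>
      (PySem.List.pyRange 0 c 1).foldl (fun acc2 j =>
        if pvCell grid i j ≠ target then acc2
        else if i = 0 ∨ i = r - 1 ∨ j = 0 ∨ j = c - 1 ∨ (i + 1, j) ∈ reach ∨
                (i - 1, j) ∈ reach ∨ (i, j + 1) ∈ reach ∨ (i, j - 1) ∈ reach
        then acc2 ++ [(i, j)] else acc2) acc) []
  (removed.length : Int)

-- ===== PRECONDITION & SPEC =====
-- Pre_ excludes exactly the inputs where Python A raises IndexError: the empty grid (len(grid[0]))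
-- and grids with a row shorter than row 0 (the full scan reads grid[i][j] for every j < len(grid[0])).
def Pre_forklift (grid : List (List String)) (target : String) : Prop :=
  grid ≠ [] ∧ ∀ row ∈ grid, (grid.headD []).length ≤ row.length
instance (grid : List (List String)) (target : String) : Decidable (Pre_forklift grid target) := by
  unfold Pre_forklift; infer_instance

def pvWitness_forklift : List (List String) × String := ([["1", "0"], ["0", "1"]], "1")

def Spec_forklift (grid : List (List String)) (target : String) (out : Int) : Prop := out = forklift_alt grid target
instance (grid : List (List String)) (target : String) (out : Int) : Decidable (Spec_forklift grid target out) := by unfold Spec_forklift; infer_instance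

-- ===== CLAIM (what is proved, stated in full; the proofs are below) =====
def Claim_equal_forklift : Prop := ∀ (grid : List (List String)) (target : String), Dom_forklift grid target → Pre_forklift grid target → Spec_forklift grid target (forklift grid target)

-- ===== LEMMAS AND PROOFS =====

-- in-grid cells, empty cells, border cells (for the fixed n × m view)
def pvInG (n m : Int) (p : Int × Int) : Prop :=
  0 ≤ p.1 ∧ p.1 < n ∧ 0 ≤ p.2 ∧ p.2 < m

def pvE (grid : List (List String)) (n m : Int) (p : Int × Int) : Prop :=
  pvInG n m p ∧ pvCell grid p.1 p.2 = "0"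

def pvSide (n m : Int) (p : Int × Int) : Prop :=
  p.1 = 0 ∨ p.1 = n - 1 ∨ p.2 = 0 ∨ p.2 = m - 1

def pvBd (n m : Int) (p : Int × Int) : Prop := pvInG n m p ∧ pvSide n m p

-- closure of a seed set S under stepping to empty neighbours
inductive pvCl (grid : List (List String)) (n m : Int) (S : Int × Int → Prop) : Int × Int → Prop
  | base (p : Int × Int) : S p → pvCl grid n m S p
  | step (p q : Int × Int) : pvCl grid n m S p → q ∈ pvNbrs p → pvE grid n m q →
      pvCl grid n m S q

-- A's per-cell seed set: the empty neighbours of c0.  B's seed set: the border empty cells.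
def pvSA (grid : List (List String)) (n m : Int) (c0 p : Int × Int) : Prop :=
  p ∈ pvNbrs c0 ∧ pvE grid n m p

def pvSB (grid : List (List String)) (n m : Int) (p : Int × Int) : Prop :=
  pvBd n m p ∧ pvE grid n m p

-- the finset of all empty in-grid cells (used only for fuel accounting)
def pvECells (grid : List (List String)) (n m : Int) : Finset (Int × Int) :=
  (((Finset.range n.toNat) ×ˢ (Finset.range m.toNat)).image
      (fun ab => ((ab.1 : Int), (ab.2 : Int)))).filter
    (fun p => pvCell grid p.1 p.2 = "0")

lemma mem_pvECells {grid : List (List String)} {n m : Int} {x : Int × Int} :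
    x ∈ pvECells grid n m ↔ pvE grid n m x := by
  unfold pvECells pvE pvInG
  simp only [Finset.mem_filter, Finset.mem_image, Finset.mem_product, Finset.mem_range,
    Prod.exists]
  constructor
  · rintro ⟨⟨a, b, ⟨ha, hb⟩, rfl⟩, h2⟩
    exact ⟨⟨by positivity, by omega, by positivity, by omega⟩, h2⟩
  · rintro ⟨⟨h1, h2, h3, h4⟩, h5⟩
    exact ⟨⟨x.1.toNat, x.2.toNat, ⟨by omega, by omega⟩, by simp [Prod.ext_iff]; omega⟩, h5⟩

lemma card_pvECells_le (grid : List (List String)) (n m : Int) :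
    (pvECells grid n m).card ≤ n.toNat * m.toNat := by
  calc (pvECells grid n m).card
      ≤ (((Finset.range n.toNat) ×ˢ (Finset.range m.toNat)).image
          (fun ab => ((ab.1 : Int), (ab.2 : Int)))).card := Finset.card_filter_le _ _
    _ ≤ ((Finset.range n.toNat) ×ˢ (Finset.range m.toNat)).card := Finset.card_image_le
    _ = n.toNat * m.toNat := by simp

lemma pvNbrs_symm {p q : Int × Int} : p ∈ pvNbrs q ↔ q ∈ pvNbrs p := by
  simp only [pvNbrs, List.mem_cons, List.not_mem_nil, or_false, Prod.ext_iff]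
  omega

lemma pvDirs_map_eq_nbrs (r c : Int) :
    pvDirs.map (fun d => (r + d.1, c + d.2)) = pvNbrs (r, c) := by
  simp [pvDirs, pvNbrs, sub_eq_add_neg]

lemma pvSide_escape {n m : Int} {p : Int × Int} (h : pvInG n m p) :
    pvSide n m p ↔ ∃ d ∈ pvDirs,
      p.1 + d.1 < 0 ∨ n ≤ p.1 + d.1 ∨ p.2 + d.2 < 0 ∨ m ≤ p.2 + d.2 := by
  obtain ⟨h1, h2, h3, h4⟩ := h
  simp only [pvSide, pvDirs, List.mem_cons, List.not_mem_nil, or_false, Prod.exists]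
  constructor
  · rintro (h | h | h | h)
    · exact ⟨-1, 0, by simp, by omega⟩
    · exact ⟨1, 0, by simp, by omega⟩
    · exact ⟨0, -1, by simp, by omega⟩
    · exact ⟨0, 1, by simp, by omega⟩
  · rintro ⟨a, b, hab, hout⟩
    rcases hab with h | h | h | h <;> (obtain ⟨rfl, rfl⟩ := Prod.mk.injEq .. ▸ h; omega)

-- ---- A side: the seeding loop ----
lemma pvSeedA_none_iff (grid : List (List String)) (n m si sj : Int) :
    ∀ (ds : List (Int × Int)) (q : List (Int × Int)),
    (pvSeedA grid n m si sj ds q = none ↔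
      ∃ d ∈ ds, si + d.1 < 0 ∨ n ≤ si + d.1 ∨ sj + d.2 < 0 ∨ m ≤ sj + d.2) := by
  intro ds
  induction ds with
  | nil => intro q; simp [pvSeedA]
  | cons d ds ih =>
    intro q
    obtain ⟨di, dj⟩ := d
    simp only [pvSeedA]
    by_cases h : si + di < 0 ∨ n ≤ si + di ∨ sj + dj < 0 ∨ m ≤ sj + dj
    · rw [if_pos h]
      exact iff_of_true rfl ⟨(di, dj), by simp, h⟩
    · rw [if_neg h, ih]
      constructor
      · rintro ⟨d, hd, hout⟩; exact ⟨d, List.mem_cons_of_mem _ hd, hout⟩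
      · rintro ⟨d, hd, hout⟩
        rcases List.mem_cons.mp hd with rfl | hd
        · exact absurd hout h
        · exact ⟨d, hd, hout⟩
lemma pvSeedA_some_mem (grid : List (List String)) (n m si sj : Int) :
    ∀ (ds : List (Int × Int)) (q q' : List (Int × Int)),
    pvSeedA grid n m si sj ds q = some q' →
    ∀ x, (x ∈ q' ↔ x ∈ q ∨
      (x ∈ ds.map (fun d => (si + d.1, sj + d.2)) ∧ pvE grid n m x)) := by
  intro ds
  induction ds with
  | nil => intro q q' h x; simp only [pvSeedA, Option.some.injEq] at h; subst h; simp
  | cons d ds ih =>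
    intro q q' h x
    obtain ⟨di, dj⟩ := d
    simp only [pvSeedA] at h
    split_ifs at h with hout hc
    · push_neg at hout
      rw [ih _ _ h x]
      have hE : pvE grid n m (si + di, sj + dj) :=
        ⟨⟨hout.1, hout.2.1, hout.2.2.1, hout.2.2.2⟩, by exact hc⟩
      simp only [List.mem_append, List.map_cons, List.mem_cons, List.not_mem_nil, or_false]
      constructor
      · rintro ((hx | rfl) | ⟨hx, hE'⟩)
        · exact Or.inl hx
        · exact Or.inr ⟨Or.inl rfl, hE⟩
        · exact Or.inr ⟨Or.inr hx, hE'⟩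
      · rintro (hx | ⟨(rfl | hx), hE'⟩)
        · exact Or.inl (Or.inl hx)
        · exact Or.inl (Or.inr rfl)
        · exact Or.inr ⟨hx, hE'⟩
    · rw [ih _ _ h x]
      have hnE : ¬ pvE grid n m (si + di, sj + dj) := fun hE => hc hE.2
      simp only [List.map_cons, List.mem_cons]
      constructor
      · rintro (hx | ⟨hx, hE'⟩)
        · exact Or.inl hx
        · exact Or.inr ⟨Or.inr hx, hE'⟩
      · rintro (hx | ⟨(rfl | hx), hE'⟩)
        · exact Or.inl hx
        · exact absurd hE' hnE
        · exact Or.inr ⟨hx, hE'⟩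
lemma pvExpandA_none_iff (grid : List (List String)) (n m r c : Int)
    (v : Finset (Int × Int)) :
    ∀ (ds : List (Int × Int)) (q : List (Int × Int)),
    (pvExpandA grid n m r c v ds q = none ↔
      ∃ d ∈ ds, r + d.1 < 0 ∨ n ≤ r + d.1 ∨ c + d.2 < 0 ∨ m ≤ c + d.2) := by
  intro ds
  induction ds with
  | nil => intro q; simp [pvExpandA]
  | cons d ds ih =>
    intro q
    obtain ⟨di, dj⟩ := d
    simp only [pvExpandA]
    by_cases h : r + di < 0 ∨ n ≤ r + di ∨ c + dj < 0 ∨ m ≤ c + dj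
    · rw [if_pos h]
      exact iff_of_true rfl ⟨(di, dj), by simp, h⟩
    · rw [if_neg h, ih]
      constructor
      · rintro ⟨d, hd, hout⟩; exact ⟨d, List.mem_cons_of_mem _ hd, hout⟩
      · rintro ⟨d, hd, hout⟩
        rcases List.mem_cons.mp hd with rfl | hd
        · exact absurd hout h
        · exact ⟨d, hd, hout⟩
lemma pvExpandA_some_mem (grid : List (List String)) (n m r c : Int)
    (v : Finset (Int × Int)) :
    ∀ (ds : List (Int × Int)) (q q' : List (Int × Int)),
    pvExpandA grid n m r c v ds q = some q' →
    ∀ x, (x ∈ q' ↔ x ∈ q ∨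
      (x ∈ ds.map (fun d => (r + d.1, c + d.2)) ∧ pvE grid n m x ∧ x ∉ v)) := by
  intro ds
  induction ds with
  | nil => intro q q' h x; simp only [pvExpandA, Option.some.injEq] at h; subst h; simp
  | cons d ds ih =>
    intro q q' h x
    obtain ⟨di, dj⟩ := d
    simp only [pvExpandA] at h
    split_ifs at h with hout hc
    · push_neg at hout
      rw [ih _ _ h x]
      have hE : pvE grid n m (r + di, c + dj) :=
        ⟨⟨hout.1, hout.2.1, hout.2.2.1, hout.2.2.2⟩, by exact hc.2⟩
      simp only [List.mem_append, List.map_cons, List.mem_cons, List.not_mem_nil, or_false]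
      constructor
      · rintro ((hx | rfl) | ⟨hx, hE'⟩)
        · exact Or.inl hx
        · exact Or.inr ⟨Or.inl rfl, hE, hc.1⟩
        · exact Or.inr ⟨Or.inr hx, hE'⟩
      · rintro (hx | ⟨(rfl | hx), hE'⟩)
        · exact Or.inl (Or.inl hx)
        · exact Or.inl (Or.inr rfl)
        · exact Or.inr ⟨hx, hE'⟩
    · rw [ih _ _ h x]
      have hn : ¬ (pvE grid n m (r + di, c + dj) ∧ (r + di, c + dj) ∉ v) :=
        fun hE => hc ⟨hE.2, hE.1.2⟩
      simp only [List.map_cons, List.mem_cons]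
      constructor
      · rintro (hx | ⟨hx, hE'⟩)
        · exact Or.inl hx
        · exact Or.inr ⟨Or.inr hx, hE'⟩
      · rintro (hx | ⟨(rfl | hx), hE', hv'⟩)
        · exact Or.inl hx
        · exact absurd ⟨hE', hv'⟩ hn
        · exact Or.inr ⟨hx, hE', hv'⟩
lemma pvExpandA_some_len (grid : List (List String)) (n m r c : Int)
    (v : Finset (Int × Int)) :
    ∀ (ds : List (Int × Int)) (q q' : List (Int × Int)),
    pvExpandA grid n m r c v ds q = some q' → q'.length ≤ q.length + ds.length := by
  intro ds
  induction ds with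
  | nil => intro q q' h; simp only [pvExpandA, Option.some.injEq] at h; subst h; simp
  | cons d ds ih =>
    intro q q' h
    obtain ⟨di, dj⟩ := d
    simp only [pvExpandA] at h
    split_ifs at h with hout hc
    · have := ih _ _ h
      simp only [List.length_append, List.length_cons, List.length_nil] at *
      omega
    · have := ih _ _ h
      simp only [List.length_cons] at *
      omega
lemma pvCl_bind {grid : List (List String)} {n m : Int} {S S' : Int × Int → Prop}
    {x : Int × Int} (h : pvCl grid n m S x)
    (hs : ∀ y, S y → pvCl grid n m S' y) : pvCl grid n m S' x := by
  induction h with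
  | base p hp => exact hs p hp
  | step p q _ hn he ih => exact pvCl.step p q ih hn he

lemma pvCl_mono {grid : List (List String)} {n m : Int} {S S' : Int × Int → Prop}
    {x : Int × Int} (h : pvCl grid n m S x)
    (hs : ∀ y, S y → S' y) : pvCl grid n m S' x :=
  pvCl_bind h (fun y hy => pvCl.base y (hs y hy))

lemma pvCl_E {grid : List (List String)} {n m : Int} {S : Int × Int → Prop}
    {x : Int × Int} (h : pvCl grid n m S x) (hs : ∀ y, S y → pvE grid n m y) :
    pvE grid n m x := by
  induction h with
  | base p hp => exact hs p hp
  | step p q _ _ he _ => exact he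

lemma pvCl_exists_single {grid : List (List String)} {n m : Int} {S : Int × Int → Prop}
    {x : Int × Int} :
    pvCl grid n m S x ↔ ∃ s, S s ∧ pvCl grid n m (fun y => y = s) x := by
  constructor
  · intro h
    induction h with
    | base p hp => exact ⟨p, hp, pvCl.base p rfl⟩
    | step p q _ hn he ih =>
      obtain ⟨s, hs, hc⟩ := ih
      exact ⟨s, hs, pvCl.step p q hc hn he⟩
  · rintro ⟨s, hs, hc⟩
    exact pvCl_bind hc (fun y hy => by subst hy; exact pvCl.base y hs)

lemma pvCl_single_symm {grid : List (List String)} {n m : Int} {s x : Int × Int}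
    (hs : pvE grid n m s) (h : pvCl grid n m (fun y => y = s) x) :
    pvCl grid n m (fun y => y = x) s ∧ pvE grid n m x := by
  induction h with
  | base p hp => subst hp; exact ⟨pvCl.base p rfl, hs⟩
  | step p q hp hn he ih =>
    obtain ⟨hps, hep⟩ := ih
    refine ⟨pvCl_bind hps ?_, he⟩
    intro y hy; subst hy
    exact pvCl.step q y (pvCl.base q rfl) (pvNbrs_symm.mp hn) hep

lemma pvRev {grid : List (List String)} {n m : Int} (c0 : Int × Int) :
    (∃ b, pvBd n m b ∧ pvCl grid n m (pvSA grid n m c0) b) ↔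
      ∃ p, pvSA grid n m c0 p ∧ pvCl grid n m (pvSB grid n m) p := by
  constructor
  · rintro ⟨b, hb, hc⟩
    obtain ⟨s, hs, hsc⟩ := pvCl_exists_single.mp hc
    obtain ⟨hbs, hEb⟩ := pvCl_single_symm hs.2 hsc
    exact ⟨s, hs, pvCl_mono hbs (fun y hy => by subst hy; exact ⟨hb, hEb⟩)⟩
  · rintro ⟨p, hp, hc⟩
    obtain ⟨s, hs, hsc⟩ := pvCl_exists_single.mp hc
    obtain ⟨hps, _⟩ := pvCl_single_symm hs.2 hsc
    exact ⟨s, ⟨hs.1.1, hs.1.2⟩, pvCl_mono hps (fun y hy => by subst hy; exact hp)⟩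

-- ---- A side: the BFS while-loop ----
lemma pvClosed_subset {grid : List (List String)} {n m : Int} {S : Int × Int → Prop}
    {v : Finset (Int × Int)}
    (hcl : ∀ p ∈ v, ∀ t ∈ pvNbrs p, pvE grid n m t → t ∈ v)
    (hseed : ∀ p, S p → p ∈ v) :
    ∀ x, pvCl grid n m S x → x ∈ v := by
  intro x h
  induction h with
  | base p hp => exact hseed p hp
  | step p q hp hn he ih => exact hcl p ih q hn he

lemma pvNoBorder {grid : List (List String)} {n m : Int} {S : Int × Int → Prop}
    {v : Finset (Int × Int)}
    (Hv : ∀ p ∈ v, pvCl grid n m S p ∧ ¬ pvSide n m p)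
    (Hcl : ∀ p ∈ v, ∀ t ∈ pvNbrs p, pvE grid n m t → t ∈ v)
    (Hseed : ∀ p, S p → p ∈ v) :
    ¬ ∃ b, pvBd n m b ∧ pvCl grid n m S b := by
  rintro ⟨b, hb, hc⟩
  exact (Hv b (pvClosed_subset Hcl Hseed b hc)).2 hb.2

lemma pvBfsLoopA_spec (grid : List (List String)) (n m : Int) (S : Int × Int → Prop) :
    ∀ (fuel : Nat) (q : List (Int × Int)) (v : Finset (Int × Int)),
    (∀ p ∈ q, pvE grid n m p ∧ pvCl grid n m S p) →
    (∀ p ∈ v, pvCl grid n m S p ∧ ¬ pvSide n m p) →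
    (∀ p ∈ v, ∀ t ∈ pvNbrs p, pvE grid n m t → t ∈ v ∨ t ∈ q) →
    (∀ p, S p → p ∈ v ∨ p ∈ q) →
    (∀ p ∈ v, p ∈ pvECells grid n m) →
    (q.length + 5 * ((pvECells grid n m).card - v.card) + 1 ≤ fuel) →
    (pvBfsLoopA grid n m fuel q v = true ↔ ∃ b, pvBd n m b ∧ pvCl grid n m S b) := by
  intro fuel
  induction fuel with
  | zero =>
    intro q v Hq Hv Hcl Hseed Hsub Hfuel
    cases q with
    | nil =>
      refine iff_of_false (by simp [pvBfsLoopA]) ?_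
      refine pvNoBorder Hv ?_ ?_
      · intro p hp t ht hE
        exact (Hcl p hp t ht hE).elim id (fun h => absurd h (List.not_mem_nil))
      · intro p hp
        exact (Hseed p hp).elim id (fun h => absurd h (List.not_mem_nil))
    | cons hd rest =>
      simp only [List.length_cons] at Hfuel
      exact absurd Hfuel (by omega)
  | succ fuel ih =>
    intro q v Hq Hv Hcl Hseed Hsub Hfuel
    cases q with
    | nil =>
      refine iff_of_false (by simp [pvBfsLoopA]) ?_
      refine pvNoBorder Hv ?_ ?_
      · intro p hp t ht hE
        exact (Hcl p hp t ht hE).elim id (fun h => absurd h (List.not_mem_nil))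
      · intro p hp
        exact (Hseed p hp).elim id (fun h => absurd h (List.not_mem_nil))
    | cons hd rest =>
      obtain ⟨r, c⟩ := hd
      by_cases hv : (r, c) ∈ v
      · have hstep : pvBfsLoopA grid n m (fuel + 1) ((r, c) :: rest) v =
            pvBfsLoopA grid n m fuel rest v := by
          simp [pvBfsLoopA, hv]
        rw [hstep]
        refine ih rest v (fun p hp => Hq p (List.mem_cons_of_mem _ hp)) Hv ?_ ?_ Hsub ?_
        · intro p hp t ht hE
          rcases Hcl p hp t ht hE with h | h
          · exact Or.inl h
          · rcases List.mem_cons.mp h with rfl | h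
            · exact Or.inl hv
            · exact Or.inr h
        · intro p hp
          rcases Hseed p hp with h | h
          · exact Or.inl h
          · rcases List.mem_cons.mp h with rfl | h
            · exact Or.inl hv
            · exact Or.inr h
        · simp only [List.length_cons] at Hfuel
          omega
      · obtain ⟨hE0, hCl0⟩ := Hq (r, c) List.mem_cons_self
        rcases hexp : pvExpandA grid n m r c (insert (r, c) v) pvDirs rest with _ | q'
        · have hstep : pvBfsLoopA grid n m (fuel + 1) ((r, c) :: rest) v = true := by
            simp [pvBfsLoopA, hv, hexp]
          rw [hstep]
          refine iff_of_true rfl ⟨(r, c), ⟨hE0.1, ?_⟩, hCl0⟩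
          exact (pvSide_escape hE0.1).mpr
            ((pvExpandA_none_iff grid n m r c _ pvDirs rest).mp hexp)
        · have hstep : pvBfsLoopA grid n m (fuel + 1) ((r, c) :: rest) v =
              pvBfsLoopA grid n m fuel q' (insert (r, c) v) := by
            simp [pvBfsLoopA, hv, hexp]
          rw [hstep]
          have hmem := pvExpandA_some_mem grid n m r c _ pvDirs rest _ hexp
          rw [pvDirs_map_eq_nbrs] at hmem
          have hnoSide : ¬ pvSide n m (r, c) := by
            intro hs
            have h2 := (pvSide_escape hE0.1).mp hs
            rw [← pvExpandA_none_iff grid n m r c (insert (r, c) v) pvDirs rest] at h2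
            rw [h2] at hexp
            simp at hexp
          have hlen := pvExpandA_some_len grid n m r c _ pvDirs rest _ hexp
          have hcV : (r, c) ∈ pvECells grid n m := mem_pvECells.mpr hE0
          have hlt : v.card < (pvECells grid n m).card :=
            Finset.card_lt_card
              ((Finset.ssubset_iff_of_subset (fun p hp => Hsub p hp)).mpr ⟨(r, c), hcV, hv⟩)
          refine ih q' (insert (r, c) v) ?_ ?_ ?_ ?_ ?_ ?_
          · intro p hp
            rcases (hmem p).mp hp with h | ⟨hn, hE, _⟩
            · exact Hq p (List.mem_cons_of_mem _ h)
            · exact ⟨hE, pvCl.step _ _ hCl0 hn hE⟩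
          · intro p hp
            rcases Finset.mem_insert.mp hp with rfl | hp
            · exact ⟨hCl0, hnoSide⟩
            · exact Hv p hp
          · intro p hp t ht hE
            rcases Finset.mem_insert.mp hp with rfl | hp
            · by_cases htv : t ∈ insert (r, c) v
              · exact Or.inl htv
              · exact Or.inr ((hmem t).mpr (Or.inr ⟨ht, hE, htv⟩))
            · rcases Hcl p hp t ht hE with h | h
              · exact Or.inl (Finset.mem_insert_of_mem h)
              · rcases List.mem_cons.mp h with rfl | h
                · exact Or.inl (Finset.mem_insert_self _ _)
                · exact Or.inr ((hmem t).mpr (Or.inl h))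
          · intro p hp
            rcases Hseed p hp with h | h
            · exact Or.inl (Finset.mem_insert_of_mem h)
            · rcases List.mem_cons.mp h with rfl | h
              · exact Or.inl (Finset.mem_insert_self _ _)
              · exact Or.inr ((hmem p).mpr (Or.inl h))
          · intro p hp
            rcases Finset.mem_insert.mp hp with rfl | hp
            · exact hcV
            · exact Hsub p hp
          · have hci : (insert (r, c) v).card = v.card + 1 :=
              Finset.card_insert_of_notMem hv
            have hd4 : pvDirs.length = 4 := rfl
            simp only [List.length_cons] at Hfuel
            omega
lemma pvBfsA_spec (grid : List (List String)) (i j : Int)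
    (hing : pvInG (grid.length : Int) (((grid.headD []).length : Int)) (i, j)) :
    (pvBfsA grid i j = true ↔
      pvSide (grid.length : Int) (((grid.headD []).length : Int)) (i, j) ∨
        ∃ b, pvBd (grid.length : Int) (((grid.headD []).length : Int)) b ∧
          pvCl grid (grid.length : Int) (((grid.headD []).length : Int))
            (pvSA grid (grid.length : Int) (((grid.headD []).length : Int)) (i, j)) b) := by
  simp only [pvBfsA]
  split
  next hseed =>
    refine iff_of_true rfl (Or.inl ?_)
    exact (pvSide_escape hing).mpr ((pvSeedA_none_iff grid _ _ i j pvDirs []).mp hseed)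
  next q0 hseed =>
    have hnoSide : ¬ pvSide (grid.length : Int) (((grid.headD []).length : Int)) (i, j) := by
      intro hs
      have h2 := (pvSide_escape hing).mp hs
      rw [← pvSeedA_none_iff grid _ _ i j pvDirs []] at h2
      rw [h2] at hseed
      simp at hseed
    have hq0 := pvSeedA_some_mem grid _ _ i j pvDirs [] q0 hseed
    rw [pvDirs_map_eq_nbrs] at hq0
    rw [pvBfsLoopA_spec grid _ _ (pvSA grid (grid.length : Int) (((grid.headD []).length : Int)) (i, j)) _ q0 ∅ ?_ ?_ ?_ ?_ ?_ ?_]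
    · exact (or_iff_right hnoSide).symm
    · intro p hp
      rcases (hq0 p).mp hp with h | ⟨hn, hE⟩
      · exact absurd h (List.not_mem_nil)
      · exact ⟨hE, pvCl.base p ⟨hn, hE⟩⟩
    · intro p hp; exact absurd hp (Finset.notMem_empty p)
    · intro p hp; exact absurd hp (Finset.notMem_empty p)
    · intro p hp
      exact Or.inr ((hq0 p).mpr (Or.inr ⟨hp.1, hp.2⟩))
    · intro p hp; exact absurd hp (Finset.notMem_empty p)
    · have hF := card_pvECells_le grid (grid.length : Int) (((grid.headD []).length : Int))
      simp only [Finset.card_empty]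
      omega
-- ---- B side: the push loop ----
lemma pvPushB_spec (grid : List (List String)) (n m : Int) :
    ∀ (ps : List (Int × Int)) (stack : List (Int × Int)) (reach : Finset (Int × Int)),
    (∀ x ∈ reach, x ∈ (pvPushB grid n m ps (stack, reach)).2) ∧
    (∀ x ∈ stack, x ∈ (pvPushB grid n m ps (stack, reach)).1) ∧
    (∀ x ∈ (pvPushB grid n m ps (stack, reach)).2,
      x ∈ reach ∨ (x ∈ ps ∧ pvE grid n m x)) ∧
    (∀ x ∈ ps, pvE grid n m x → x ∈ (pvPushB grid n m ps (stack, reach)).2) ∧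
    (∀ x ∈ (pvPushB grid n m ps (stack, reach)).1,
      x ∈ stack ∨ (x ∈ ps ∧ pvE grid n m x)) ∧
    (∀ x ∈ (pvPushB grid n m ps (stack, reach)).2,
      x ∉ reach → x ∈ (pvPushB grid n m ps (stack, reach)).1) ∧
    ((pvPushB grid n m ps (stack, reach)).1.length + reach.card =
      stack.length + (pvPushB grid n m ps (stack, reach)).2.card) := by
  intro ps
  induction ps with
  | nil =>
    intro stack reach
    simp only [pvPushB]
    exact ⟨fun x hx => hx, fun x hx => hx, fun x hx => Or.inl hx, by simp,
      fun x hx => Or.inl hx, fun x hx hnx => (hnx hx).elim, by trivial⟩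
  | cons p ps ih =>
    intro stack reach
    simp only [pvPushB]
    by_cases hcond : 0 ≤ p.1 ∧ p.1 < n ∧ 0 ≤ p.2 ∧ p.2 < m ∧ p ∉ reach ∧
        pvCell grid p.1 p.2 = "0"
    · rw [if_pos hcond]
      obtain ⟨Pa, Pb, Pc, Pd, Pe, Pf, Pg⟩ := ih (p :: stack) (insert p reach)
      have hEp : pvE grid n m p :=
        ⟨⟨hcond.1, hcond.2.1, hcond.2.2.1, hcond.2.2.2.1⟩, hcond.2.2.2.2.2⟩
      refine ⟨?_, ?_, ?_, ?_, ?_, ?_, ?_⟩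
      · exact fun x hx => Pa x (Finset.mem_insert_of_mem hx)
      · exact fun x hx => Pb x (List.mem_cons_of_mem _ hx)
      · intro x hx
        rcases Pc x hx with h | h
        · rcases Finset.mem_insert.mp h with rfl | h
          · exact Or.inr ⟨List.mem_cons_self, hEp⟩
          · exact Or.inl h
        · exact Or.inr ⟨List.mem_cons_of_mem _ h.1, h.2⟩
      · intro x hx hE
        rcases List.mem_cons.mp hx with rfl | hx
        · exact Pa x (Finset.mem_insert_self _ _)
        · exact Pd x hx hE
      · intro x hx
        rcases Pe x hx with h | h
        · rcases List.mem_cons.mp h with rfl | h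
          · exact Or.inr ⟨List.mem_cons_self, hEp⟩
          · exact Or.inl h
        · exact Or.inr ⟨List.mem_cons_of_mem _ h.1, h.2⟩
      · intro x hx hnx
        by_cases hxp : x = p
        · subst hxp
          exact Pb x List.mem_cons_self
        · exact Pf x hx (fun hmem => (Finset.mem_insert.mp hmem).elim hxp hnx)
      · have hci : (insert p reach).card = reach.card + 1 :=
          Finset.card_insert_of_notMem hcond.2.2.2.2.1
        simp only [List.length_cons] at Pg ⊢
        omega
    · rw [if_neg hcond]
      obtain ⟨Pa, Pb, Pc, Pd, Pe, Pf, Pg⟩ := ih stack reach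
      refine ⟨Pa, Pb, ?_, ?_, ?_, Pf, Pg⟩
      · intro x hx
        rcases Pc x hx with h | h
        · exact Or.inl h
        · exact Or.inr ⟨List.mem_cons_of_mem _ h.1, h.2⟩
      · intro x hx hE
        rcases List.mem_cons.mp hx with rfl | hx
        · have hxr : x ∈ reach := by
            by_contra hxr
            exact hcond ⟨hE.1.1, hE.1.2.1, hE.1.2.2.1, hE.1.2.2.2, hxr, hE.2⟩
          exact Pa x hxr
        · exact Pd x hx hE
      · intro x hx
        rcases Pe x hx with h | h
        · exact Or.inl h
        · exact Or.inr ⟨List.mem_cons_of_mem _ h.1, h.2⟩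
-- ---- B side: the DFS while-loop ----
lemma pvDfsB_nil (grid : List (List String)) (n m : Int) (fuel : Nat)
    (reach : Finset (Int × Int)) : pvDfsB grid n m fuel [] reach = reach := by
  cases fuel <;> rfl

lemma pvDfsB_spec (grid : List (List String)) (n m : Int) :
    ∀ (fuel : Nat) (stack : List (Int × Int)) (reach : Finset (Int × Int)),
    (∀ x ∈ reach, pvCl grid n m (pvSB grid n m) x ∧ pvE grid n m x) →
    (∀ x ∈ stack, x ∈ reach) →
    (∀ x ∈ reach, x ∉ stack → ∀ t ∈ pvNbrs x, pvE grid n m t → t ∈ reach) →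
    (∀ p, pvSB grid n m p → p ∈ reach) →
    (stack.length + 2 * ((pvECells grid n m).card - reach.card) + 1 ≤ fuel) →
    ∀ x, (x ∈ pvDfsB grid n m fuel stack reach ↔ pvCl grid n m (pvSB grid n m) x) := by
  intro fuel
  induction fuel with
  | zero =>
    intro stack reach Hr Hs Hcl Hseed Hfuel x
    cases stack with
    | nil =>
      rw [pvDfsB_nil]
      constructor
      · intro hx; exact (Hr x hx).1
      · intro hc
        exact pvClosed_subset
          (fun p hp t ht hE => Hcl p hp (List.not_mem_nil) t ht hE) Hseed x hc
    | cons hd rest =>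
      simp only [List.length_cons] at Hfuel
      exact absurd Hfuel (by omega)
  | succ fuel ih =>
    intro stack reach Hr Hs Hcl Hseed Hfuel x
    cases stack with
    | nil =>
      rw [pvDfsB_nil]
      constructor
      · intro hx; exact (Hr x hx).1
      · intro hc
        exact pvClosed_subset
          (fun p hp t ht hE => Hcl p hp (List.not_mem_nil) t ht hE) Hseed x hc
    | cons p rest =>
      have hp_reach := Hs p List.mem_cons_self
      have hClp := (Hr p hp_reach).1
      obtain ⟨Pa, Pb, Pc, Pd, Pe, Pf, Pg⟩ := pvPushB_spec grid n m (pvNbrs p) rest reach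
      have hstep : pvDfsB grid n m (fuel + 1) (p :: rest) reach =
          pvDfsB grid n m fuel (pvPushB grid n m (pvNbrs p) (rest, reach)).1
            (pvPushB grid n m (pvNbrs p) (rest, reach)).2 := by
        simp only [pvDfsB]
      rw [hstep]
      have Hr' : ∀ y ∈ (pvPushB grid n m (pvNbrs p) (rest, reach)).2,
          pvCl grid n m (pvSB grid n m) y ∧ pvE grid n m y := by
        intro y hy
        rcases Pc y hy with h | ⟨hn, hE⟩
        · exact Hr y h
        · exact ⟨pvCl.step _ _ hClp hn hE, hE⟩
      refine ih _ _ Hr' ?_ ?_ ?_ ?_ x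
      · intro y hy
        rcases Pe y hy with h | ⟨hn, hE⟩
        · exact Pa y (Hs y (List.mem_cons_of_mem _ h))
        · exact Pd y hn hE
      · intro y hy hny t ht hE
        by_cases hyr : y ∈ reach
        · by_cases hyp : y = p
          · subst hyp; exact Pd t ht hE
          · have hyrest : y ∉ rest := fun hr => hny (Pb y hr)
            have hycons : y ∉ (p :: rest) := by
              intro hmem
              rcases List.mem_cons.mp hmem with h | h
              · exact hyp h
              · exact hyrest h
            exact Pa t (Hcl y hyr hycons t ht hE)
        · exact absurd (Pf y hy hyr) hny
      · exact fun s hs => Pa s (Hseed s hs)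
      · have hsub2 : (pvPushB grid n m (pvNbrs p) (rest, reach)).2.card ≤
            (pvECells grid n m).card := by
          apply Finset.card_le_card
          intro y hy
          exact mem_pvECells.mpr (Hr' y hy).2
        have hsub1 : reach.card ≤ (pvPushB grid n m (pvNbrs p) (rest, reach)).2.card :=
          Finset.card_le_card (fun y hy => Pa y hy)
        simp only [List.length_cons] at Hfuel
        omega
-- ---- B side: the seeding scan ----
lemma pvSeedRow_same (grid : List (List String)) (n m i : Int) :
    ∀ (js : List Int) (st : List (Int × Int) × Finset (Int × Int)),
    (∀ x, x ∈ st.1 ↔ x ∈ st.2) →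
    ∀ x, (x ∈ (js.foldl (pvSeedStepB grid n m i) st).1 ↔
          x ∈ (js.foldl (pvSeedStepB grid n m i) st).2) := by
  intro js
  induction js with
  | nil => intro st h x; exact h x
  | cons j js ih =>
    intro st h x
    simp only [List.foldl_cons]
    refine ih _ ?_ x
    intro y
    unfold pvSeedStepB
    split_ifs with hc
    · show y ∈ (i, j) :: st.1 ↔ y ∈ insert (i, j) st.2
      rw [List.mem_cons, Finset.mem_insert, h y]
    · exact h y
lemma pvSeedCols_same (grid : List (List String)) (n m : Int) :
    ∀ (is : List Int) (st : List (Int × Int) × Finset (Int × Int)),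
    (∀ x, x ∈ st.1 ↔ x ∈ st.2) →
    ∀ x, (x ∈ (is.foldl (fun st i =>
            (PySem.List.pyRange 0 m 1).foldl (pvSeedStepB grid n m i) st) st).1 ↔
          x ∈ (is.foldl (fun st i =>
            (PySem.List.pyRange 0 m 1).foldl (pvSeedStepB grid n m i) st) st).2) := by
  intro is
  induction is with
  | nil => intro st h x; exact h x
  | cons i is ih =>
    intro st h x
    simp only [List.foldl_cons]
    exact ih _ (pvSeedRow_same grid n m i _ _ h) x

lemma pvSeedB_same (grid : List (List String)) (n m : Int) :
    ∀ x, (x ∈ (pvSeedB grid n m).1 ↔ x ∈ (pvSeedB grid n m).2) := by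
  intro x
  unfold pvSeedB
  exact pvSeedCols_same grid n m _ _ (by simp) x
lemma pvSeedRow_mem (grid : List (List String)) (n m i : Int) :
    ∀ (js : List Int) (st : List (Int × Int) × Finset (Int × Int)) (x : Int × Int),
    (x ∈ (js.foldl (pvSeedStepB grid n m i) st).2 ↔ x ∈ st.2 ∨
      (x.1 = i ∧ x.2 ∈ js ∧ (i = 0 ∨ i = n - 1 ∨ x.2 = 0 ∨ x.2 = m - 1) ∧
        pvCell grid x.1 x.2 = "0")) := by
  intro js
  induction js with
  | nil => intro st x; simp
  | cons j js ih =>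
    intro st x
    obtain ⟨x1, x2⟩ := x
    simp only [List.foldl_cons]
    rw [ih]
    unfold pvSeedStepB
    split_ifs with hc
    · simp only [Finset.mem_insert, List.mem_cons, Prod.mk.injEq]
      constructor
      · rintro ((⟨rfl, rfl⟩ | hx) | ⟨rfl, hj, hside, hcell⟩)
        · exact Or.inr ⟨rfl, Or.inl rfl, hc.1, hc.2.1⟩
        · exact Or.inl hx
        · exact Or.inr ⟨rfl, Or.inr hj, hside, hcell⟩
      · rintro (hx | ⟨rfl, (rfl | hj), hside, hcell⟩)
        · exact Or.inl (Or.inr hx)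
        · exact Or.inl (Or.inl ⟨rfl, rfl⟩)
        · exact Or.inr ⟨rfl, hj, hside, hcell⟩
    · simp only [List.mem_cons]
      constructor
      · rintro (hx | ⟨rfl, hj, hside, hcell⟩)
        · exact Or.inl hx
        · exact Or.inr ⟨rfl, Or.inr hj, hside, hcell⟩
      · rintro (hx | ⟨rfl, (rfl | hj), hside, hcell⟩)
        · exact Or.inl hx
        · refine Or.inl ?_
          by_contra hmem
          exact hc ⟨hside, by exact hcell, by exact hmem⟩
        · exact Or.inr ⟨rfl, hj, hside, hcell⟩
lemma pvSeedCols_mem (grid : List (List String)) (n m : Int) :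
    ∀ (is : List Int) (st : List (Int × Int) × Finset (Int × Int)) (x : Int × Int),
    (x ∈ (is.foldl (fun st i =>
        (PySem.List.pyRange 0 m 1).foldl (pvSeedStepB grid n m i) st) st).2 ↔
      x ∈ st.2 ∨ (x.1 ∈ is ∧ x.2 ∈ PySem.List.pyRange 0 m 1 ∧
        (x.1 = 0 ∨ x.1 = n - 1 ∨ x.2 = 0 ∨ x.2 = m - 1) ∧
        pvCell grid x.1 x.2 = "0")) := by
  intro is
  induction is with
  | nil => intro st x; simp
  | cons i is ih =>
    intro st x
    simp only [List.foldl_cons]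
    rw [ih, pvSeedRow_mem]
    simp only [List.mem_cons]
    constructor
    · rintro ((hx | ⟨h1, hj, hside, hcell⟩) | ⟨h1, hj, hside, hcell⟩)
      · exact Or.inl hx
      · exact Or.inr ⟨Or.inl h1, hj, by rw [h1]; exact hside, hcell⟩
      · exact Or.inr ⟨Or.inr h1, hj, hside, hcell⟩
    · rintro (hx | ⟨(h1 | h1), hj, hside, hcell⟩)
      · exact Or.inl (Or.inl hx)
      · exact Or.inl (Or.inr ⟨h1, hj, by rw [← h1]; exact hside, hcell⟩)
      · exact Or.inr ⟨h1, hj, hside, hcell⟩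

lemma pvSeedB_mem (grid : List (List String)) (n m : Int) (x : Int × Int) :
    x ∈ (pvSeedB grid n m).2 ↔ pvSB grid n m x := by
  unfold pvSeedB
  rw [pvSeedCols_mem]
  simp only [Finset.notMem_empty, false_or, PySem.List.mem_pyRange_one]
  unfold pvSB pvBd pvE pvInG pvSide
  constructor
  · rintro ⟨⟨h1, h2⟩, ⟨h3, h4⟩, hside, hcell⟩
    exact ⟨⟨⟨h1, h2, h3, h4⟩, hside⟩, ⟨h1, h2, h3, h4⟩, hcell⟩
  · rintro ⟨⟨⟨h1, h2, h3, h4⟩, hside⟩, _, hcell⟩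
    exact ⟨⟨h1, h2⟩, ⟨h3, h4⟩, hside, hcell⟩
lemma pvReachB_spec (grid : List (List String)) (n m : Int) (x : Int × Int) :
    x ∈ pvReachB grid n m ↔ pvCl grid n m (pvSB grid n m) x := by
  simp only [pvReachB]
  refine pvDfsB_spec grid n m _ _ _ ?_ ?_ ?_ ?_ ?_ x
  · intro y hy
    have h := (pvSeedB_mem grid n m y).mp hy
    exact ⟨pvCl.base y h, h.2⟩
  · intro y hy
    exact (pvSeedB_same grid n m y).mp hy
  · intro y hy hny
    exact absurd ((pvSeedB_same grid n m y).mpr hy) hny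
  · intro p hp
    exact (pvSeedB_mem grid n m p).mpr hp
  · have hF := card_pvECells_le grid n m
    omega
-- ---- the pointwise bridge and the verdict ----
lemma pvPoint (grid : List (List String)) (i j : Int)
    (hing : pvInG (grid.length : Int) (((grid.headD []).length : Int)) (i, j)) :
    (pvBfsA grid i j = true ↔
      (i = 0 ∨ i = (grid.length : Int) - 1 ∨ j = 0 ∨ j = ((grid.headD []).length : Int) - 1 ∨
        (i + 1, j) ∈ pvReachB grid (grid.length : Int) (((grid.headD []).length : Int)) ∨
        (i - 1, j) ∈ pvReachB grid (grid.length : Int) (((grid.headD []).length : Int)) ∨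
        (i, j + 1) ∈ pvReachB grid (grid.length : Int) (((grid.headD []).length : Int)) ∨
        (i, j - 1) ∈ pvReachB grid (grid.length : Int) (((grid.headD []).length : Int)))) := by
  rw [pvBfsA_spec grid i j hing, pvRev]
  constructor
  · rintro (hside | ⟨p, ⟨hn, _⟩, hc⟩)
    · rcases hside with h | h | h | h
      · exact Or.inl h
      · exact Or.inr (Or.inl h)
      · exact Or.inr (Or.inr (Or.inl h))
      · exact Or.inr (Or.inr (Or.inr (Or.inl h)))
    · have hp := (pvReachB_spec grid _ _ p).mpr hc
      simp only [pvNbrs, List.mem_cons, List.not_mem_nil, or_false] at hn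
      rcases hn with rfl | rfl | rfl | rfl
      · exact Or.inr (Or.inr (Or.inr (Or.inr (Or.inl hp))))
      · exact Or.inr (Or.inr (Or.inr (Or.inr (Or.inr (Or.inl hp)))))
      · exact Or.inr (Or.inr (Or.inr (Or.inr (Or.inr (Or.inr (Or.inl hp))))))
      · exact Or.inr (Or.inr (Or.inr (Or.inr (Or.inr (Or.inr (Or.inr hp))))))
  · intro h
    rcases h with h | h | h | h | h | h | h | h
    · exact Or.inl (Or.inl h)
    · exact Or.inl (Or.inr (Or.inl h))
    · exact Or.inl (Or.inr (Or.inr (Or.inl h)))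
    · exact Or.inl (Or.inr (Or.inr (Or.inr h)))
    · have hc := (pvReachB_spec grid _ _ _).mp h
      exact Or.inr ⟨(i + 1, j), ⟨by simp [pvNbrs], pvCl_E hc (fun y hy => hy.2)⟩, hc⟩
    · have hc := (pvReachB_spec grid _ _ _).mp h
      exact Or.inr ⟨(i - 1, j), ⟨by simp [pvNbrs], pvCl_E hc (fun y hy => hy.2)⟩, hc⟩
    · have hc := (pvReachB_spec grid _ _ _).mp h
      exact Or.inr ⟨(i, j + 1), ⟨by simp [pvNbrs], pvCl_E hc (fun y hy => hy.2)⟩, hc⟩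
    · have hc := (pvReachB_spec grid _ _ _).mp h
      exact Or.inr ⟨(i, j - 1), ⟨by simp [pvNbrs], pvCl_E hc (fun y hy => hy.2)⟩, hc⟩
-- ===== VERDICT (by name: the statement is the Claim_ definition above) =====
theorem forklift_spec : Claim_equal_forklift := by
  intro grid target _ _
  simp only [Spec_forklift, forklift, forklift_alt]
  congr 2
  apply PySem.List.foldl_congr_mem
  intro acc i hi
  apply PySem.List.foldl_congr_mem
  intro acc2 j hj
  rw [PySem.List.mem_pyRange_one] at hi hj
  by_cases ht : pvCell grid i j ≠ target
  · rw [if_pos ht, if_pos ht]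
  · rw [if_neg ht, if_neg ht]
    have hing : pvInG (grid.length : Int) (((grid.headD []).length : Int)) (i, j) :=
      ⟨hi.1, hi.2, hj.1, hj.2⟩
    exact if_congr (pvPoint grid i j hing) rfl rfl
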